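-- pv_equiv track=rewrite | github.com/jeck00119/carmageddon2-trainer | dev_probe.py | clean_text_string
-- ===== SOURCE A (Python) =====
-- def clean_text_string(s):
--     """Truncate at first non-printable run."""
--     if not s:
--         return ''
--     out = ''
--     for c in s:
--         if 0x20 <= ord(c) < 0x7f:
--             out += c
--         else:
--             break
--     return out
-- ===== SOURCE B (Python) =====
-- import re
--
-- _PRINTABLE = re.compile(r'[\x20-\x7e]*')
--
-- def clean_text_string(s):
--     """Truncate at first non-printable run."""
--     if not s:
--         return ''
--     return _PRINTABLE.match(s).group()
-- ===== Notes on version B (the rewrite author's own statement) =====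
-- stated objective: idiomatic
-- what changed: Replaces the explicit char loop with += accumulation and break by a single regex match of the maximal leading printable-ASCII run.
import Mathlib
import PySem

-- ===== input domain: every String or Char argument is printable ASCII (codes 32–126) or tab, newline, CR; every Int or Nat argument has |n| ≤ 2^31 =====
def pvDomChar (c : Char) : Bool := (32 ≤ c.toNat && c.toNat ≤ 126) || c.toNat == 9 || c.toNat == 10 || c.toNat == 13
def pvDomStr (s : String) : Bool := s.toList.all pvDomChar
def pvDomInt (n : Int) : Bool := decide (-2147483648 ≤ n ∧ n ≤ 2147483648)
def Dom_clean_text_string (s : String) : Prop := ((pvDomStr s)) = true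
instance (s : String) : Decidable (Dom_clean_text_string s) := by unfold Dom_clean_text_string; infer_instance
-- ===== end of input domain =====

-- B replaces A's explicit accumulate-and-break loop by matching the maximal leading
-- printable-ASCII run (a regex in Python; its exact meaning, a leading takeWhile, here).

-- ===== PORT A =====
-- A's for-loop with `out += c` and `break`: recursion over the chars carrying `out`,
-- returning `out` as soon as a non-printable char is seen.
def pvCleanLoop (out : List Char) : List Char → List Char
  | [] => out
  | c :: rest => if 32 ≤ c.toNat ∧ c.toNat < 127 then pvCleanLoop (out ++ [c]) rest else out

def clean_text_string (s : String) : String :=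
  if s = "" then "" else String.mk (pvCleanLoop [] s.toList)

-- ===== PORT B =====
-- `re.match(r'[\x20-\x7e]*', s).group()` = the maximal leading run of printable ASCII.
def clean_text_string_alt (s : String) : String :=
  if s = "" then ""
  else String.mk (s.toList.takeWhile (fun c => 32 ≤ c.toNat && c.toNat < 127))

-- ===== PRECONDITION & SPEC =====
def Spec_clean_text_string (s : String) (out : String) : Prop := out = clean_text_string_alt s
instance (s : String) (out : String) : Decidable (Spec_clean_text_string s out) := by unfold Spec_clean_text_string; infer_instance

-- ===== CLAIM (what is proved, stated in full; the proofs are below) =====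
def Claim_equal_clean_text_string : Prop := ∀ (s : String), Dom_clean_text_string s → Spec_clean_text_string s (clean_text_string s)

-- ===== LEMMAS AND PROOFS =====
theorem pvCleanLoop_eq (l out : List Char) :
    pvCleanLoop out l = out ++ l.takeWhile (fun c => 32 ≤ c.toNat && c.toNat < 127) := by
  induction l generalizing out with
  | nil => simp [pvCleanLoop]
  | cons c rest ih =>
    simp only [pvCleanLoop, List.takeWhile]
    by_cases h : 32 ≤ c.toNat ∧ c.toNat < 127
    · rw [if_pos h, ih]
      have : (32 ≤ c.toNat && c.toNat < 127) = true := by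
        simp [h.1, h.2]
      simp [this]
    · rw [if_neg h]
      have : (32 ≤ c.toNat && c.toNat < 127) = false := by
        rw [Bool.and_eq_false_iff]
        rcases Decidable.not_and_iff_not_or_not.mp h with h1 | h1
        · left; simpa using h1
        · right; simpa using h1
      simp [this]

-- ===== VERDICT (by name: the statement is the Claim_ definition above) =====
theorem clean_text_string_spec : Claim_equal_clean_text_string := by
  intro s _
  unfold Spec_clean_text_string clean_text_string clean_text_string_alt
  by_cases h : s = ""
  · simp [h]
  · simp [h, pvCleanLoop_eq]
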